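-- pv_equiv track=rewrite | github.com/vedprakash-m/artha | scripts/agents/capital_agent.py | _overall_confidence
-- ===== SOURCE A (Python) =====
-- from typing import Any
--
-- def _overall_confidence(seen_cats: dict[str, dict[str, Any]]) -> str:
--     if not seen_cats:
--         return "INSUFFICIENT_DATA"
--     levels = [p["confidence"] for p in seen_cats.values()]
--     if "INSUFFICIENT_DATA" in levels:
--         return "LOW"
--     if "LOW" in levels:
--         return "LOW"
--     if "MEDIUM" in levels:
--         return "MEDIUM"
--     return "HIGH"
-- ===== SOURCE B (Python) =====
-- def _overall_confidence(seen_cats: dict) -> str: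
--     if not seen_cats:
--         return "INSUFFICIENT_DATA"
--     rank = {"INSUFFICIENT_DATA": 0, "LOW": 0, "MEDIUM": 1}
--     m = 2
--     for p in seen_cats.values():
--         m = min(m, rank.get(p["confidence"], 2))
--     return ("LOW", "MEDIUM", "HIGH")[m]
-- ===== Notes on version B (the rewrite author's own statement) =====
-- stated objective: alternative
-- what changed: Replaces the rebuilt levels list and the four-way membership cascade by a single min-reduction over a severity-rank table, mapping the minimum rank back to a label.
import Mathlib
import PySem

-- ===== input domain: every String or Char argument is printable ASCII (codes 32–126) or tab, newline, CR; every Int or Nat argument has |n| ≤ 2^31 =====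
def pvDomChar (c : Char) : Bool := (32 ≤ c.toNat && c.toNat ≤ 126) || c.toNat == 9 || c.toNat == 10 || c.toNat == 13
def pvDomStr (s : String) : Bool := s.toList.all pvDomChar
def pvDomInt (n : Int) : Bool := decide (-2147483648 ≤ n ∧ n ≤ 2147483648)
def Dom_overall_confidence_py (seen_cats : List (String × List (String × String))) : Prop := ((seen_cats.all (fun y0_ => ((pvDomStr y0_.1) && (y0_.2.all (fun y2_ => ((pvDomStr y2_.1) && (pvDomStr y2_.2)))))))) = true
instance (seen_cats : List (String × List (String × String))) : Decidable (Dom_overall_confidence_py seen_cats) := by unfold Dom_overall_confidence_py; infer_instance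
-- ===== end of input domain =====

-- B replaces A's rebuilt levels list plus a four-way membership cascade with a single
-- min-reduction over a severity-rank table (objective: alternative, same cost).

-- ===== PORT A =====
-- p["confidence"]; missing key = KeyError, excluded by Pre_ (getD "" is never reached there)
def pvConf (d : List (String × String)) : String :=
  ((PySem.Dict.mk d).get? "confidence").getD ""

def overall_confidence_py (seen_cats : List (String × List (String × String))) : String :=
  if seen_cats = [] then "INSUFFICIENT_DATA"
  else
    let levels := seen_cats.map (fun kv => pvConf kv.2)
    if "INSUFFICIENT_DATA" ∈ levels then "LOW"
    else if "LOW" ∈ levels then "LOW"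
    else if "MEDIUM" ∈ levels then "MEDIUM"
    else "HIGH"

-- ===== PORT B =====
-- rank.get(s, 2) of Source B
def pvRank (s : String) : Nat :=
  if s = "INSUFFICIENT_DATA" then 0 else if s = "LOW" then 0 else if s = "MEDIUM" then 1 else 2

def overall_confidence_py_alt (seen_cats : List (String × List (String × String))) : String :=
  if seen_cats = [] then "INSUFFICIENT_DATA"
  else
    let m := seen_cats.foldl (fun acc kv => min acc (pvRank (pvConf kv.2))) 2
    if m = 0 then "LOW" else if m = 1 then "MEDIUM" else "HIGH"

-- ===== PRECONDITION & SPEC =====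
-- Pre_ excludes inner dicts missing the "confidence" key (A raises KeyError there) and
-- association lists with duplicate keys, which do not denote a Python dict (in a dict
-- literal later duplicates silently overwrite earlier ones, so the list form is ambiguous).
def Pre_overall_confidence_py (seen_cats : List (String × List (String × String))) : Prop :=
  (seen_cats.map Prod.fst).Nodup ∧
  ∀ kv ∈ seen_cats, (kv.2.map Prod.fst).Nodup ∧ "confidence" ∈ kv.2.map Prod.fst
instance (seen_cats : List (String × List (String × String))) : Decidable (Pre_overall_confidence_py seen_cats) := by unfold Pre_overall_confidence_py; infer_instance

def pvWitness_overall_confidence_py : (List (String × List (String × String))) :=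
  [("a", [("confidence", "LOW")]), ("b", [("confidence", "HIGH")])]

def Spec_overall_confidence_py (seen_cats : List (String × List (String × String))) (out : String) : Prop := out = overall_confidence_py_alt seen_cats
instance (seen_cats : List (String × List (String × String))) (out : String) : Decidable (Spec_overall_confidence_py seen_cats out) := by unfold Spec_overall_confidence_py; infer_instance

-- ===== CLAIM (what is proved, stated in full; the proofs are below) =====
def Claim_equal_overall_confidence_py : Prop := ∀ (seen_cats : List (String × List (String × String))), Dom_overall_confidence_py seen_cats → Pre_overall_confidence_py seen_cats → Spec_overall_confidence_py seen_cats (overall_confidence_py seen_cats)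

-- ===== LEMMAS AND PROOFS =====

theorem pv_foldl_min_assoc (ls : List String) (a b : Nat) :
    ls.foldl (fun acc s => min acc (pvRank s)) (min a b)
      = min a (ls.foldl (fun acc s => min acc (pvRank s)) b) := by
  induction ls generalizing a b with
  | nil => rfl
  | cons x ls ih =>
    simp only [List.foldl_cons, Nat.min_assoc]
    exact ih a _

theorem pv_foldl_min_char (ls : List String) :
    ls.foldl (fun acc s => min acc (pvRank s)) 2
      = if "INSUFFICIENT_DATA" ∈ ls ∨ "LOW" ∈ ls then 0
        else if "MEDIUM" ∈ ls then 1 else 2 := by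
  induction ls with
  | nil => simp
  | cons x ls ih =>
    have h1 : (x :: ls).foldl (fun acc s => min acc (pvRank s)) 2
        = min (pvRank x) (ls.foldl (fun acc s => min acc (pvRank s)) 2) := by
      simp only [List.foldl_cons]
      rw [Nat.min_comm 2 (pvRank x), pv_foldl_min_assoc]
    rw [h1, ih]
    by_cases hI : x = "INSUFFICIENT_DATA"
    · simp [hI, List.mem_cons, pvRank]
    · by_cases hL : x = "LOW"
      · simp [hL, List.mem_cons, pvRank]
      · have nI : ¬ ("INSUFFICIENT_DATA" = x) := fun h => hI h.symm
        have nL : ¬ ("LOW" = x) := fun h => hL h.symm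
        by_cases hM : x = "MEDIUM"
        · have hr : pvRank x = 1 := by simp [pvRank, hM]
          rw [hr]
          simp only [List.mem_cons, hM, true_or, if_true]
          split_ifs with h h' <;> simp_all
        · have nM : ¬ ("MEDIUM" = x) := fun h => hM h.symm
          have hr : pvRank x = 2 := by simp [pvRank, hI, hL, hM]
          rw [hr]
          simp only [List.mem_cons, nI, nL, nM, false_or]
          split_ifs with h h' <;> omega

-- ===== VERDICT (by name: the statement is the Claim_ definition above) =====
theorem overall_confidence_py_spec : Claim_equal_overall_confidence_py := by
  intro seen_cats _ _
  unfold Spec_overall_confidence_py overall_confidence_py overall_confidence_py_alt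
  by_cases hnil : seen_cats = []
  · simp [hnil]
  · simp only [hnil, if_false]
    have hfold : seen_cats.foldl (fun acc kv => min acc (pvRank (pvConf kv.2))) 2
        = (seen_cats.map (fun kv => pvConf kv.2)).foldl (fun acc s => min acc (pvRank s)) 2 := by
      rw [List.foldl_map]
    rw [hfold, pv_foldl_min_char]
    by_cases h0 : "INSUFFICIENT_DATA" ∈ seen_cats.map (fun kv => pvConf kv.2) <;>
      by_cases h1 : "LOW" ∈ seen_cats.map (fun kv => pvConf kv.2) <;>
      by_cases h2 : "MEDIUM" ∈ seen_cats.map (fun kv => pvConf kv.2) <;>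
      simp [h0, h1, h2]
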